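-- pv_equiv track=rewrite | github.com/omnomdombomb/license_uploader | app.py | sanitize_license_field
-- ===== SOURCE A (Python) =====
-- def sanitize_license_field(value, max_length=255, allow_special=False):
--     """
--     Sanitize license field input
--     Args:
--         value: Input value to sanitize
--         max_length: Maximum allowed length
--         allow_special: Whether to allow special characters
--     Returns:
--         Sanitized string
--     """
--     if not value:
--         return value
--
--     # Convert to string and strip whitespace
--     sanitized = str(value).strip()
--
--     # Enforce maximum length
--     if len(sanitized) > max_length:
--         sanitized = sanitized[:max_length]
--
--     # Remove potentially dangerous characters if not allowing special chars
--     if not allow_special: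
--         # Remove HTML/script tags and other dangerous characters
--         dangerous_chars = ['<', '>', '{', '}', '\\', '`']
--         for char in dangerous_chars:
--             sanitized = sanitized.replace(char, '')
--
--     return sanitized
-- ===== SOURCE B (Python) =====
-- _DANGEROUS = frozenset('<>{}\\`')
--
-- def sanitize_license_field(value, max_length=255, allow_special=False):
--     if not value:
--         return value
--     sanitized = str(value).strip()
--     if len(sanitized) > max_length:
--         sanitized = sanitized[:max_length]
--     if allow_special:
--         return sanitized
--     # single pass instead of six full-string replace() scans
--     return ''.join(c for c in sanitized if c not in _DANGEROUS)
-- ===== Notes on version B (the rewrite author's own statement) =====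
-- stated objective: idiomatic
-- what changed: The six sequential str.replace passes over the string are replaced by one single-pass filter that joins the characters not in a frozenset of the dangerous characters.
import Mathlib
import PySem

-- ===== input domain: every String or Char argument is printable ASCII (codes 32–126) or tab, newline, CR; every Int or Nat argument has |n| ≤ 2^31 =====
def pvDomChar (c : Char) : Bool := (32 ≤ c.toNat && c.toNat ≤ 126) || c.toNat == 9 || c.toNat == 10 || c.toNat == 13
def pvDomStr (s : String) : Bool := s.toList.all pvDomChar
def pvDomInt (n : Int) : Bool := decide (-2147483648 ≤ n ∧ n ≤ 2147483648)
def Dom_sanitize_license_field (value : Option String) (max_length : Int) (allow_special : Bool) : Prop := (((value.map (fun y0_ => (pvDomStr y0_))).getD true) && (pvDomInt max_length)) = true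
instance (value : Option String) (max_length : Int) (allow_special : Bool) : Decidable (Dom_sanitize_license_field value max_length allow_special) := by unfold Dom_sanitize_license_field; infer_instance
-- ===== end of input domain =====

-- B replaces A's six sequential str.replace passes with one single-pass filter over the characters (idiomatic rewrite).


-- ===== PORT A =====
def sanitize_license_field (value : Option String) (max_length : Int) (allow_special : Bool) : Option String :=
  match value with
  | none => none                      -- 'if not value: return value' (None is falsy)
  | some v =>
    if v == "" then some v            -- '' is falsy: returned unchanged
    else
      let sanitized := PySem.Str.strip v
      let sanitized := if max_length < PySem.Str.len sanitized
                       then PySem.Str.slice sanitized none (some max_length) else sanitized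
      let sanitized := if !allow_special
                       then ['<', '>', '{', '}', '\\', '`'].foldl
                              (fun s c => PySem.Str.replace s (String.ofList [c]) "") sanitized
                       else sanitized
      some sanitized

-- ===== PORT B =====
def pvDangerousChars : List Char := ['<', '>', '{', '}', '\\', '`']

def sanitize_license_field_alt (value : Option String) (max_length : Int) (allow_special : Bool) : Option String :=
  match value with
  | none => none
  | some v =>
    if v == "" then some v
    else
      let sanitized := PySem.Str.strip v
      let sanitized := if max_length < PySem.Str.len sanitized
                       then PySem.Str.slice sanitized none (some max_length) else sanitized
      if allow_special then some sanitized
      else some (String.ofList (sanitized.toList.filter (fun c => !(pvDangerousChars.contains c))))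

-- ===== PRECONDITION & SPEC =====
def Spec_sanitize_license_field (value : Option String) (max_length : Int) (allow_special : Bool) (out : Option String) : Prop := out = sanitize_license_field_alt value max_length allow_special
instance (value : Option String) (max_length : Int) (allow_special : Bool) (out : Option String) : Decidable (Spec_sanitize_license_field value max_length allow_special out) := by unfold Spec_sanitize_license_field; infer_instance

-- ===== CLAIM (what is proved, stated in full; the proofs are below) =====
def Claim_equal_sanitize_license_field : Prop := ∀ (value : Option String) (max_length : Int) (allow_special : Bool), Dom_sanitize_license_field value max_length allow_special → Spec_sanitize_license_field value max_length allow_special (sanitize_license_field value max_length allow_special)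

-- ===== LEMMAS AND PROOFS =====

theorem pv_go_single (c : Char) : ∀ (fuel : Nat) (l acc : List Char), l.length ≤ fuel →
    PySem.Chars.replace.go [c] [] fuel l acc = acc.reverse ++ l.filter (fun x => !(x == c)) := by
  intro fuel
  induction fuel with
  | zero => intro l acc h; simp at h; subst h; simp [PySem.Chars.replace.go]
  | succ n ih =>
    intro l acc h
    cases l with
    | nil => simp [PySem.Chars.replace.go]
    | cons x t =>
      rw [PySem.Chars.replace.go]
      simp only [List.isPrefixOf, List.filter]
      by_cases hx : x = c
      · subst hx
        simp only [beq_self_eq_true, Bool.not_true]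
        simp [ih t acc (by simpa using h)]
      · have h1 : (c == x) = false := beq_eq_false_iff_ne.mpr (Ne.symm hx)
        simp only [h1]
        simp [ih t (x :: acc) (by simpa using h), (by simp [hx] : (x == c) = false)]

theorem pv_replace_single (c : Char) (l : List Char) :
    PySem.Chars.replace l [c] [] = l.filter (fun x => !(x == c)) := by
  rw [PySem.Chars.replace]
  simp [pv_go_single c l.length l [] (le_refl _)]

theorem pv_foldl_replace (cs : List Char) (s : String) :
    (cs.foldl (fun s c => PySem.Str.replace s (String.ofList [c]) "") s).toList
      = s.toList.filter (fun x => !(cs.contains x)) := by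
  induction cs generalizing s with
  | nil => simp
  | cons c rest ih =>
    simp only [List.foldl_cons, ih, PySem.Str.toList_replace]
    simp only [String.toList_ofList, show ("" : String).toList = ([] : List Char) from rfl]
    rw [pv_replace_single, List.filter_filter]
    apply List.filter_congr
    intro x _
    simp only [List.contains_cons, Bool.not_or]
    cases h1 : (x == c) <;> cases h2 : rest.contains x <;> rfl

-- ===== VERDICT (by name: the statement is the Claim_ definition above) =====
theorem sanitize_license_field_spec : Claim_equal_sanitize_license_field := by
  intro value max_length allow_special _
  unfold Spec_sanitize_license_field sanitize_license_field sanitize_license_field_alt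
  cases value with
  | none => rfl
  | some v =>
    by_cases hv : (v == "") = true
    · simp [hv]
    · simp only [hv, Bool.false_eq_true, if_false]
      cases allow_special with
      | true => simp
      | false =>
        simp only [Bool.not_false, if_true, Bool.false_eq_true, if_false, Option.some.injEq]
        apply String.toList_inj.mp
        rw [pv_foldl_replace, String.toList_ofList]
        rfl
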